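-- pv_equiv track=rewrite | github.com/braydio/CUSTODIAN | python-sim/game/simulations/world_state/core/drone_repairs.py | _edge_positions
-- ===== SOURCE A (Python) =====
-- def _edge_positions(width: int, height: int, positions: set[tuple[int, int]]) -> dict[str, set[tuple[int, int]]]:
--     max_x = width - 1
--     max_y = height - 1
--     return {
--         "LEFT": {pos for pos in positions if pos[0] == 0},
--         "RIGHT": {pos for pos in positions if pos[0] == max_x},
--         "BOTTOM": {pos for pos in positions if pos[1] == 0},
--         "TOP": {pos for pos in positions if pos[1] == max_y},
--     }
-- ===== SOURCE B (Python) =====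
-- def _edge_positions(width: int, height: int, positions: set[tuple[int, int]]) -> dict[str, set[tuple[int, int]]]:
--     # Index positions by x and by y once; each edge set is then a dictionary lookup.
--     by_x = {}
--     by_y = {}
--     for pos in positions:
--         by_x.setdefault(pos[0], set()).add(pos)
--         by_y.setdefault(pos[1], set()).add(pos)
--     return {
--         "LEFT": by_x.get(0, set()),
--         "RIGHT": by_x.get(width - 1, set()),
--         "BOTTOM": by_y.get(0, set()),
--         "TOP": by_y.get(height - 1, set()),
--     }
-- ===== Notes on version B (the rewrite author's own statement) =====
-- stated objective: alternative
-- what changed: Instead of filtering the positions by four edge predicates, B builds two hash indexes (positions grouped by x and by y) in a single pass and obtains each edge set by a dictionary lookup at 0, width-1 or height-1, so no per-position edge comparison is performed.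
import Mathlib
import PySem

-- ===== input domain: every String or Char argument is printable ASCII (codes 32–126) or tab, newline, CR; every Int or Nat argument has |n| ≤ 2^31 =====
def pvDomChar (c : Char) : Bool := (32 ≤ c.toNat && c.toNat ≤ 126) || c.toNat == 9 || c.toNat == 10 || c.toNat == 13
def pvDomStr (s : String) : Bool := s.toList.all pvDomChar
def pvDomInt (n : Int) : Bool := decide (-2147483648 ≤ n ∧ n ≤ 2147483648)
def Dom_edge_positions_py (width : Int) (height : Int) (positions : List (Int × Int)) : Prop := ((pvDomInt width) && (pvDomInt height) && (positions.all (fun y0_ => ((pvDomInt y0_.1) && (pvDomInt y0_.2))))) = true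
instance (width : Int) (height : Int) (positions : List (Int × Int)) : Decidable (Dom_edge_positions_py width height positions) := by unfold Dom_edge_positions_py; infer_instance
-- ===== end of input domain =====

-- B replaces A's four predicate-filter scans with two hash indexes (positions grouped by x and by y) built in one pass,
-- each edge set then being a single dictionary lookup (alternative algorithm, same cost class).
-- ===== PORT A =====
-- A: four independent set-comprehension scans of `positions` (set comprehension over
-- distinct elements ported as List.filter, preserving iteration order).
def edge_positions_py (width : Int) (height : Int) (positions : List (Int × Int)) : List (String × List (Int × Int)) :=
  let max_x := width - 1
  let max_y := height - 1
  [("LEFT", positions.filter (fun pos => pos.1 == 0)),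
   ("RIGHT", positions.filter (fun pos => pos.1 == max_x)),
   ("BOTTOM", positions.filter (fun pos => pos.2 == 0)),
   ("TOP", positions.filter (fun pos => pos.2 == max_y))]

-- ===== PORT B =====
-- B: one pass building two group-by dictionaries keyed by x and by y
-- (`setdefault(k, set()).add(pos)` = modify k [] (· ++ [pos]) on distinct elements),
-- then four dictionary lookups with a default empty set.
def edge_positions_py_alt (width : Int) (height : Int) (positions : List (Int × Int)) : List (String × List (Int × Int)) :=
  let st := positions.foldl
    (fun st pos => (st.1.modify pos.1 [] (· ++ [pos]), st.2.modify pos.2 [] (· ++ [pos])))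
    ((PySem.Dict.empty : PySem.Dict Int (List (Int × Int))),
     (PySem.Dict.empty : PySem.Dict Int (List (Int × Int))))
  [("LEFT", st.1.getD 0 []), ("RIGHT", st.1.getD (width - 1) []),
   ("BOTTOM", st.2.getD 0 []), ("TOP", st.2.getD (height - 1) [])]

-- ===== PRECONDITION & SPEC =====
def Spec_edge_positions_py (width : Int) (height : Int) (positions : List (Int × Int)) (out : List (String × List (Int × Int))) : Prop := out = edge_positions_py_alt width height positions
instance (width : Int) (height : Int) (positions : List (Int × Int)) (out : List (String × List (Int × Int))) : Decidable (Spec_edge_positions_py width height positions out) := by unfold Spec_edge_positions_py; infer_instance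

-- ===== CLAIM =====
def Claim_equal_edge_positions_py : Prop := ∀ (width : Int) (height : Int) (positions : List (Int × Int)), Dom_edge_positions_py width height positions → Spec_edge_positions_py width height positions (edge_positions_py width height positions)

-- ===== LEMMAS AND PROOFS =====
-- Invariant of B's index-building pass: a lookup in either index extends the initial
-- binding by exactly the positions whose corresponding coordinate equals the key.
theorem index_fold_getD (l : List (Int × Int))
    (dx dy : PySem.Dict Int (List (Int × Int))) (cx cy : Int) :
    ((l.foldl
      (fun st pos => (st.1.modify pos.1 [] (· ++ [pos]), st.2.modify pos.2 [] (· ++ [pos])))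
      (dx, dy)).1.getD cx []
      = dx.getD cx [] ++ l.filter (fun pos => pos.1 == cx))
    ∧ ((l.foldl
      (fun st pos => (st.1.modify pos.1 [] (· ++ [pos]), st.2.modify pos.2 [] (· ++ [pos])))
      (dx, dy)).2.getD cy []
      = dy.getD cy [] ++ l.filter (fun pos => pos.2 == cy)) := by
  induction l generalizing dx dy with
  | nil => simp
  | cons x xs ih =>
    simp only [List.foldl_cons, List.filter_cons]
    rw [(ih _ _).1, (ih _ _).2, PySem.Dict.getD_modify, PySem.Dict.getD_modify]
    constructor <;> split_ifs with h <;> simp_all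

-- ===== VERDICT =====
theorem edge_positions_py_spec : Claim_equal_edge_positions_py := by
  intro width height positions _
  unfold Spec_edge_positions_py edge_positions_py edge_positions_py_alt
  dsimp only
  rw [(index_fold_getD positions PySem.Dict.empty PySem.Dict.empty 0 0).1,
    (index_fold_getD positions PySem.Dict.empty PySem.Dict.empty (width - 1) 0).1,
    (index_fold_getD positions PySem.Dict.empty PySem.Dict.empty 0 0).2,
    (index_fold_getD positions PySem.Dict.empty PySem.Dict.empty 0 (height - 1)).2]
  simp [PySem.Dict.getD_empty]
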